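-- pv_equiv track=rewrite | github.com/Timenem/python_selen | quests/quest183.py | count_photos
-- ===== SOURCE A (Python) =====
-- def count_photos(road: str) -> int:
--     cam_counter = 0
--     forward = road.count('.')
--     back = 0
--     for i in range(len(road)):
--         if road[i] == '<':
--             cam_counter += back
--         elif road[i] == '>':
--             cam_counter += forward
--         else:
--             forward -= 1
--             back += 1
--     return cam_counter
-- ===== SOURCE B (Python) =====
-- def count_photos(road: str) -> int:
--     dots = road.count('.')
--     arrows = [(i, ch) for i, ch in enumerate(road) if ch in '<>']
--     return sum(i - j if ch == '<' else dots - (i - j)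
--                for j, (i, ch) in enumerate(arrows))
-- ===== Notes on version B (the rewrite author's own statement) =====
-- stated objective: alternative
-- what changed: Drops A's three running counters entirely: B filters the arrows together with their positions and, for the j-th arrow at position i, computes its non-arrow prefix count in closed form as i - j, summing i-j for '<' and dots-(i-j) for '>' over one comprehension.
import Mathlib
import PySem

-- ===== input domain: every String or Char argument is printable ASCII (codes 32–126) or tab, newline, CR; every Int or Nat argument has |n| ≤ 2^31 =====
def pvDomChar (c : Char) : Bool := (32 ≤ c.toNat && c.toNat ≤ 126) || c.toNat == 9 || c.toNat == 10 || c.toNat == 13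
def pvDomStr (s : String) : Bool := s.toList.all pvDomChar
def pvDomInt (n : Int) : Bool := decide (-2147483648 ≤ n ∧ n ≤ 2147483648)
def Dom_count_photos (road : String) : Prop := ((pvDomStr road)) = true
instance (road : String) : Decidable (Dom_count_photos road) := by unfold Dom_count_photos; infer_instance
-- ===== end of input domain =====

-- B drops A's running counters: it filters the arrows with their positions and charges the
-- j-th arrow at position i with the closed form i - j; objective: alternative (same cost).

-- ===== PORT A =====
-- 'for i in range(len(road)): road[i]' visits the characters in order; ported as a fold
-- over road.toList with the same (cam_counter, forward, back) state.
def count_photos (road : String) : Int :=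
  (road.toList.foldl
    (fun (st : Int × Int × Int) ch =>
      if ch = '<' then (st.1 + st.2.2, st.2.1, st.2.2)
      else if ch = '>' then (st.1 + st.2.1, st.2.1, st.2.2)
      else (st.1, st.2.1 - 1, st.2.2 + 1))
    (0, (PySem.Str.count road "." : Int), 0)).1

-- ===== PORT B =====
-- arrows = [(i, ch) for i, ch in enumerate(road) if ch in '<>']; then
-- sum(i - j if ch == '<' else dots - (i - j) for j, (i, ch) in enumerate(arrows)).
def count_photos_alt (road : String) : Int :=
  let dots : Int := PySem.Str.count road "."
  let arrows := (PySem.List.enumerate road.toList).filter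
    (fun p => p.2 == '<' || p.2 == '>')
  ((PySem.List.enumerate arrows).map
    (fun q => if q.2.2 = '<' then q.2.1 - q.1 else dots - (q.2.1 - q.1))).sum

-- ===== PRECONDITION & SPEC =====
def Spec_count_photos (road : String) (out : Int) : Prop := out = count_photos_alt road
instance (road : String) (out : Int) : Decidable (Spec_count_photos road out) := by unfold Spec_count_photos; infer_instance

-- ===== CLAIM (what is proved, stated in full; the proofs are below) =====
def Claim_equal_count_photos : Prop := ∀ (road : String), Dom_count_photos road → Spec_count_photos road (count_photos road)

-- ===== LEMMAS AND PROOFS =====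

-- Common specification of both programs: pvGo l na dots sums, over l, na for each '<' and
-- dots - na for each '>', where na counts the non-arrow characters seen so far.
def pvGo (l : List Char) (na dots : Int) : Int :=
  match l with
  | [] => 0
  | ch :: t =>
    if ch = '<' then na + pvGo t na dots
    else if ch = '>' then dots - na + pvGo t na dots
    else pvGo t (na + 1) dots

-- A's fold from any start state (c, f, b) returns c + pvGo l b (f + b).
theorem pvFoldA (l : List Char) : ∀ (c f b : Int),
    (l.foldl
      (fun (st : Int × Int × Int) ch =>
        if ch = '<' then (st.1 + st.2.2, st.2.1, st.2.2)
        else if ch = '>' then (st.1 + st.2.1, st.2.1, st.2.2)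
        else (st.1, st.2.1 - 1, st.2.2 + 1))
      (c, f, b)).1
    = c + pvGo l b (f + b) := by
  induction l with
  | nil => intro c f b; simp [pvGo]
  | cons ch t ih =>
    intro c f b
    by_cases h1 : ch = '<'
    · simp [h1, List.foldl_cons, ih, pvGo]; ring
    · by_cases h2 : ch = '>'
      · simp [h2, List.foldl_cons, ih, pvGo]; ring
      · have : f - 1 + (b + 1) = f + b := by ring
        simp [h1, h2, List.foldl_cons, ih, pvGo, this]

-- B's filter/enumerate/map/sum from arbitrary offsets s (positions) and j (arrow rank)
-- equals pvGo l (s - j) dots: a non-arrow character occupies a position but no rank,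
-- so s - j counts exactly the non-arrow characters already passed.
theorem pvSumB (l : List Char) (dots : Int) : ∀ (s j : Int),
    ((PySem.List.enumerate
        ((PySem.List.enumerate l s).filter (fun p => p.2 == '<' || p.2 == '>')) j).map
      (fun q => if q.2.2 = '<' then q.2.1 - q.1 else dots - (q.2.1 - q.1))).sum
    = pvGo l (s - j) dots := by
  induction l with
  | nil => intro s j; simp [PySem.List.enumerate_nil, pvGo]
  | cons ch t ih =>
    intro s j
    rw [PySem.List.enumerate_cons]
    by_cases h1 : ch = '<'
    · simp [h1, PySem.List.enumerate_cons, ih,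
        show s + 1 - (j + 1) = s - j from by ring, pvGo]
    · by_cases h2 : ch = '>'
      · simp [h2, PySem.List.enumerate_cons, ih,
          show s + 1 - (j + 1) = s - j from by ring, pvGo]
      · simp [h1, h2, ih,
          show s + 1 - j = s - j + 1 from by ring, pvGo]

-- ===== VERDICT (by name: the statement is the Claim_ definition above) =====
theorem count_photos_spec : Claim_equal_count_photos := by
  intro road _
  unfold Spec_count_photos count_photos count_photos_alt
  rw [pvFoldA, pvSumB]
  norm_num
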